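-- pv_equiv track=rewrite | github.com/pesaventofilippo/adventofcode | 2018/day02/main.py | part1
-- ===== SOURCE A (Python) =====
-- def part1(lines: list[str]) -> int:
--     alphabet = "abcdefghijklmnopqrstuvwxyz"
--     twos = 0
--     threes = 0
--     for line in lines:
--         if any(line.count(c) == 2 for c in alphabet):
--             twos += 1
--         if any(line.count(c) == 3 for c in alphabet):
--             threes += 1
--     return twos * threes
-- ===== SOURCE B (Python) =====
-- def part1(lines: list[str]) -> int:
--     def has_rep(line, n):
--         counts = {}
--         for c in line:
--             if 'a' <= c <= 'z':
--                 counts[c] = counts.get(c, 0) + 1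
--         return n in counts.values()
--     twos = sum(1 for line in lines if has_rep(line, 2))
--     threes = sum(1 for line in lines if has_rep(line, 3))
--     return twos * threes
-- ===== Notes on version B (the rewrite author's own statement) =====
-- stated objective: faster
-- what changed: B replaces A's single accumulator loop that scans each line 26 times (line.count per alphabet letter) by a helper has_rep that builds one frequency map of the line's letters (filtered by the 'a'..'z' range test) and two staged counting passes over the lines whose counts are multiplied.
import Mathlib
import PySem

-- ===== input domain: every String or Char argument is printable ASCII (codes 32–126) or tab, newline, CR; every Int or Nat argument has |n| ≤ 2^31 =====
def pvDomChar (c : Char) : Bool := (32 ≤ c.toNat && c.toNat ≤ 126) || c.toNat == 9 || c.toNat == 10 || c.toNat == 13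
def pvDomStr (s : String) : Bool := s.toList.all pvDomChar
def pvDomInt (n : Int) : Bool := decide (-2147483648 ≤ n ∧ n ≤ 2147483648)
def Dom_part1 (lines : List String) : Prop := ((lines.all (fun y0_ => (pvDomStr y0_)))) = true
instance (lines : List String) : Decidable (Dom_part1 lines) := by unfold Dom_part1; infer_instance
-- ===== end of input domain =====

-- B replaces A's single accumulator loop that scans each line 26 times (line.count per letter)
-- by a helper building one frequency map per line (letters selected by the 'a'..'z' range test)
-- and two staged counting passes over the lines, whose counts are multiplied.

-- ===== PORT A =====
def part1 (lines : List String) : Int :=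
  let alphabet := "abcdefghijklmnopqrstuvwxyz"
  let r := lines.foldl (fun (tt : Int × Int) line =>
    let tt := if alphabet.toList.any (fun c => PySem.Str.count line (String.ofList [c]) == 2) then (tt.1 + 1, tt.2) else tt
    if alphabet.toList.any (fun c => PySem.Str.count line (String.ofList [c]) == 3) then (tt.1, tt.2 + 1) else tt)
    (0, 0)
  r.1 * r.2

-- ===== PORT B =====
-- helper of B: `has_rep(line, n)` — one frequency map of the line's 'a'..'z' characters,
-- then membership of n among its values
def pvHasRep (line : String) (n : Int) : Bool :=
  let counts := line.toList.foldl
    (fun (d : PySem.Dict Char Int) c =>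
      if ('a' ≤ c && c ≤ 'z') then d.insert c (d.getD c 0 + 1) else d)
    PySem.Dict.empty
  counts.values.contains n

def part1_alt (lines : List String) : Int :=
  let twos : Int := (lines.countP (fun line => pvHasRep line 2) : Int)
  let threes : Int := (lines.countP (fun line => pvHasRep line 3) : Int)
  twos * threes

-- ===== PRECONDITION & SPEC =====
def Spec_part1 (lines : List String) (out : Int) : Prop := out = part1_alt lines
instance (lines : List String) (out : Int) : Decidable (Spec_part1 lines out) := by unfold Spec_part1; infer_instance

-- ===== CLAIM =====
def Claim_equal_part1 : Prop := ∀ (lines : List String), Dom_part1 lines → Spec_part1 lines (part1 lines)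

-- ===== LEMMAS AND PROOFS =====

-- `s.count(c)` for a single character equals the character count of the list (fuelled helper first).
theorem count_go_singleton (c : Char) (s : List Char) : ∀ (fuel acc : Nat), s.length ≤ fuel →
    PySem.Chars.count.go [c] fuel s acc = acc + s.count c := by
  induction s with
  | nil => intro fuel acc _; cases fuel <;> simp [PySem.Chars.count.go]
  | cons h t ih =>
    intro fuel acc hf
    cases fuel with
    | zero => simp at hf
    | succ f =>
      simp only [PySem.Chars.count.go, List.isPrefixOf, List.count_cons]
      by_cases hc : c = h
      · subst hc
        simp [ih f (acc+1) (by simpa using hf)]; omega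
      · have h1 : (c == h) = false := by simpa using hc
        have h2 : (h == c) = false := by simpa using (Ne.symm hc)
        simp only [h1, Bool.false_and]
        rw [if_neg (by simp), ih f acc (by simpa using hf)]
        simp [h2]

theorem count_singleton (s : List Char) (c : Char) : PySem.Chars.count s [c] = s.count c := by
  simp [PySem.Chars.count, count_go_singleton c s s.length 0 le_rfl]

-- Char order compared via code points.
theorem char_le_iff (a b : Char) : a ≤ b ↔ a.toNat ≤ b.toNat :=
  Char.le_def.trans UInt32.le_iff_toNat_le

-- B's range test 'a' ≤ c ≤ 'z' selects exactly A's alphabet letters.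
theorem char_range (c : Char) : (('a' ≤ c && c ≤ 'z') = true) ↔ c ∈ "abcdefghijklmnopqrstuvwxyz".toList := by
  have hinj : Function.Injective Char.toNat := fun a b h => Char.ext (UInt32.toNat_inj.mp h)
  have hmap : "abcdefghijklmnopqrstuvwxyz".toList.map Char.toNat
      = [97,98,99,100,101,102,103,104,105,106,107,108,109,110,111,112,113,114,115,116,117,118,119,120,121,122] := by decide
  rw [show (c ∈ "abcdefghijklmnopqrstuvwxyz".toList) ↔ c.toNat ∈ "abcdefghijklmnopqrstuvwxyz".toList.map Char.toNat from (List.mem_map_of_injective hinj).symm, hmap]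
  constructor
  · intro h
    obtain ⟨ha, hz⟩ := Bool.and_eq_true_iff.mp h
    have ha' : (97:Nat) ≤ c.toNat := (char_le_iff 'a' c).mp (of_decide_eq_true ha)
    have hz' : c.toNat ≤ 122 := (char_le_iff c 'z').mp (of_decide_eq_true hz)
    simp only [List.mem_cons, List.not_mem_nil, or_false]
    omega
  · intro h
    simp only [List.mem_cons, List.not_mem_nil, or_false] at h
    have hb : (97:Nat) ≤ c.toNat ∧ c.toNat ≤ 122 := by omega
    exact Bool.and_eq_true_iff.mpr ⟨decide_eq_true ((char_le_iff 'a' c).mpr hb.1),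
      decide_eq_true ((char_le_iff c 'z').mpr hb.2)⟩

-- Per line: "some letter occurs exactly v times" (A's 26 scans) equals
-- "v occurs among the values of B's letter-frequency map", for positive v.
theorem line_eq (line : String) (v : Nat) (hv : 0 < v) :
    ("abcdefghijklmnopqrstuvwxyz".toList.any (fun c => PySem.Str.count line (String.ofList [c]) == v))
    = pvHasRep line ((v : Nat) : Int) := by
  unfold pvHasRep
  rw [PySem.List.foldl_if_eq_foldl_filter, PySem.Dict.foldl_insert_getD_add_one_eq_counter]
  set p : Char → Bool := fun c => ('a' ≤ c && c ≤ 'z') with hp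
  have hpmem : ∀ c : Char, p c = true ↔ c ∈ "abcdefghijklmnopqrstuvwxyz".toList := fun c => char_range c
  rw [Bool.eq_iff_iff]
  simp only [List.any_eq_true, beq_iff_eq, PySem.Str.count_eq, String.toList_ofList,
    count_singleton, List.contains_eq_mem, PySem.Dict.values, PySem.Dict.items_counter,
    List.map_map, Function.comp_def, List.mem_map, decide_eq_true_eq, PySem.Set.mem_ofList,
    List.mem_filter]
  constructor
  · rintro ⟨c, hc, hcount⟩
    refine ⟨c, ⟨List.count_pos_iff.mp (by omega), (hpmem c).mpr hc⟩, ?_⟩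
    rw [List.count_filter ((hpmem c).mpr hc), hcount]
  · rintro ⟨k, ⟨hkl, hkp⟩, hkv⟩
    refine ⟨k, (hpmem k).mp hkp, ?_⟩
    rw [List.count_filter hkp] at hkv
    exact_mod_cast hkv

-- A's single accumulator loop, with its two tests abstracted, computes the pair of counts.
theorem foldl_pair (p2 p3 : String → Bool) (ls : List String) : ∀ (a b : Int),
    ls.foldl (fun (tt : Int × Int) line =>
      let tt := if p2 line then (tt.1 + 1, tt.2) else tt
      if p3 line then (tt.1, tt.2 + 1) else tt) (a, b)
    = (a + (ls.countP p2 : Int), b + (ls.countP p3 : Int)) := by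
  induction ls with
  | nil => intro a b; simp
  | cons h t ih =>
    intro a b
    simp only [List.foldl_cons, List.countP_cons]
    by_cases h2 : p2 h <;> by_cases h3 : p3 h <;>
      simp only [h2, h3, if_true, Bool.false_eq_true, if_false, ih] <;>
      refine Prod.ext ?_ ?_ <;> simp <;> ring

theorem part1_eq_alt (lines : List String) : part1 lines = part1_alt lines := by
  simp only [part1, part1_alt]
  rw [foldl_pair]
  have h2 : (fun line => "abcdefghijklmnopqrstuvwxyz".toList.any (fun c => PySem.Str.count line (String.ofList [c]) == 2))
      = (fun line => pvHasRep line 2) := by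
    funext line
    have := line_eq line 2 (by norm_num)
    rw [show (((2:Nat)):Int) = (2:Int) by norm_num] at this
    exact this
  have h3 : (fun line => "abcdefghijklmnopqrstuvwxyz".toList.any (fun c => PySem.Str.count line (String.ofList [c]) == 3))
      = (fun line => pvHasRep line 3) := by
    funext line
    have := line_eq line 3 (by norm_num)
    rw [show (((3:Nat)):Int) = (3:Int) by norm_num] at this
    exact this
  rw [h2, h3]
  simp

-- ===== VERDICT =====
theorem part1_spec : Claim_equal_part1 := by
  intro lines _
  unfold Spec_part1
  exact part1_eq_alt lines
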